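-- pv_equiv track=rewrite | github.com/SarthakMaggu/style-agent | src/fashion_knowledge/color_theory.py | detect_clashes
-- ===== SOURCE A (Python) =====
-- _CLASH_PAIRS: list[frozenset[str]] = [
--     frozenset({"rust", "cool grey"}),
--     frozenset({"terracotta", "cobalt blue"}),
--     frozenset({"mustard", "lavender"}),
--     frozenset({"orange", "pink"}),
--     frozenset({"red", "green"}),  # unless deliberate Christmas-style contrast
--     frozenset({"yellow", "purple"}),
--     frozenset({"icy white", "warm beige"}),
--     frozenset({"neon yellow", "neon pink"}),
--     frozenset({"royal purple", "warm orange"}),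
-- ]
--
-- _MONO_FAMILIES: list[set[str]] = [
--     {"navy", "cobalt", "icy blue", "denim blue", "deep blue"},
--     {"rust", "terracotta", "burnt orange", "warm orange", "coral"},
--     {"burgundy", "deep burgundy", "wine", "maroon"},
--     {"emerald", "forest green", "olive green", "sage"},
--     {"charcoal", "cool grey", "slate", "silver"},
--     {"camel", "warm beige", "warm tan", "sand"},
--     {"ivory", "cream", "warm cream", "off-white"},
-- ]
--
-- def is_clash(color_a: str, color_b: str) -> bool:
--     """Return True if the two colors are a known clashing pair.
--
--     Monochromatic pairings within the same color family are never flagged as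
--     clashes even if their raw strings differ.
--
--     Args:
--         color_a: First color (lowercase, descriptive string).
--         color_b: Second color (lowercase, descriptive string).
--
--     Returns:
--         True if this is a clashing combination.
--     """
--     a, b = color_a.lower().strip(), color_b.lower().strip()
--     if a == b:
--         return False
--
--     # Monochromatic — same family never clashes
--     for family in _MONO_FAMILIES:
--         if a in family and b in family:
--             return False
--
--     return frozenset({a, b}) in {p for p in _CLASH_PAIRS}
--
-- def detect_clashes(colors: list[str]) -> list[tuple[str, str]]:
--     """Return all clashing color pairs from a list of outfit colors.
--
--     Args:
--         colors: List of color strings present in the outfit.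
--
--     Returns:
--         List of (color_a, color_b) tuples that clash.
--     """
--     clashes: list[tuple[str, str]] = []
--     normalized = [c.lower().strip() for c in colors]
--     for i in range(len(normalized)):
--         for j in range(i + 1, len(normalized)):
--             if is_clash(normalized[i], normalized[j]):
--                 clashes.append((normalized[i], normalized[j]))
--     return clashes
-- ===== SOURCE B (Python) =====
-- _CLASH_TABLE = [
--     ("rust", "cool grey"),
--     ("terracotta", "cobalt blue"),
--     ("mustard", "lavender"),
--     ("orange", "pink"),
--     ("red", "green"),
--     ("yellow", "purple"),
--     ("icy white", "warm beige"),
--     ("neon yellow", "neon pink"),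
--     ("royal purple", "warm orange"),
-- ]
--
--
-- def detect_clashes(colors):
--     """Table-driven: gather index pairs per known clash entry, then sort."""
--     normalized = [c.lower().strip() for c in colors]
--     hits = []
--     for x, y in _CLASH_TABLE:
--         xs = [i for i, c in enumerate(normalized) if c == x]
--         ys = [j for j, c in enumerate(normalized) if c == y]
--         for i in xs:
--             for j in ys:
--                 hits.append((min(i, j), max(i, j)))
--     hits.sort()
--     return [(normalized[i], normalized[j]) for i, j in hits]
-- ===== Notes on version B (the rewrite author's own statement) =====
-- stated objective: alternative
-- what changed: Replaces the all-pairs scan with per-pair is_clash checks (string renormalization, family loop, frozenset build per pair) by a table-driven gather: index lists per clash-table color, cross products giving (min,max) index pairs, sorted lexicographically, then mapped back to color pairs.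
import Mathlib
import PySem

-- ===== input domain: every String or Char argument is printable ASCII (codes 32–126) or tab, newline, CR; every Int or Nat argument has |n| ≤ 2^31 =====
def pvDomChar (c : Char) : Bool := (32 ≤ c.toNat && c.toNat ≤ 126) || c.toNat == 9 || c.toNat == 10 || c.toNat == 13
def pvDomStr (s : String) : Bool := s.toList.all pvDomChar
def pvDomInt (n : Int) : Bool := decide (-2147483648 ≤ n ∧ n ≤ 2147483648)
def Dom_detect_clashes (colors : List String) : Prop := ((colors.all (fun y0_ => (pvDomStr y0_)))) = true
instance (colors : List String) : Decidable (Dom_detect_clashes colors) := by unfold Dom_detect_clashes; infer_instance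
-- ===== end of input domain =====

-- B replaces A's all-pairs is_clash scanning by a table-driven gather of index pairs
-- (per clash-table color, cross products as (min,max) pairs) followed by a lexicographic sort.


-- ===== PORT A =====
def monoFamilies : List (List String) :=
  [["navy", "cobalt", "icy blue", "denim blue", "deep blue"],
   ["rust", "terracotta", "burnt orange", "warm orange", "coral"],
   ["burgundy", "deep burgundy", "wine", "maroon"],
   ["emerald", "forest green", "olive green", "sage"],
   ["charcoal", "cool grey", "slate", "silver"],
   ["camel", "warm beige", "warm tan", "sand"],
   ["ivory", "cream", "warm cream", "off-white"]]

def clashPairsA : List (String × String) :=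
  [("rust", "cool grey"), ("terracotta", "cobalt blue"), ("mustard", "lavender"),
   ("orange", "pink"), ("red", "green"), ("yellow", "purple"),
   ("icy white", "warm beige"), ("neon yellow", "neon pink"), ("royal purple", "warm orange")]

-- frozenset({a,b}) == frozenset({x,y}) is exactly (a=x∧b=y)∨(a=y∧b=x), also when a=b or x=y
def is_clash (color_a color_b : String) : Bool :=
  let a := PySem.Str.strip (PySem.Str.lower color_a)
  let b := PySem.Str.strip (PySem.Str.lower color_b)
  if a == b then false
  else if monoFamilies.any (fun fam => fam.contains a && fam.contains b) then false
  else clashPairsA.any (fun p => (a == p.1 && b == p.2) || (a == p.2 && b == p.1))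

def detect_clashes (colors : List String) : List (String × String) :=
  let normalized := colors.map (fun c => PySem.Str.strip (PySem.Str.lower c))
  -- indices produced by range(len) are always in range, so pyGetD is exact here
  (PySem.List.pyRange 0 (PySem.List.len normalized) 1).foldl (fun clashes i =>
    (PySem.List.pyRange (i + 1) (PySem.List.len normalized) 1).foldl (fun clashes j =>
      if is_clash (PySem.List.pyGetD normalized i "") (PySem.List.pyGetD normalized j "") then
        clashes ++ [(PySem.List.pyGetD normalized i "", PySem.List.pyGetD normalized j "")]
      else clashes) clashes) []

-- ===== PORT B =====
def clashTable : List (String × String) :=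
  [("rust", "cool grey"), ("terracotta", "cobalt blue"), ("mustard", "lavender"),
   ("orange", "pink"), ("red", "green"), ("yellow", "purple"),
   ("icy white", "warm beige"), ("neon yellow", "neon pink"), ("royal purple", "warm orange")]

def detect_clashes_alt (colors : List String) : List (String × String) :=
  let normalized := colors.map (fun c => PySem.Str.strip (PySem.Str.lower c))
  let hits := clashTable.flatMap (fun xy =>
    let xs := ((PySem.List.enumerate normalized).filter (fun p => p.2 == xy.1)).map (fun p => p.1)
    let ys := ((PySem.List.enumerate normalized).filter (fun p => p.2 == xy.2)).map (fun p => p.1)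
    xs.flatMap (fun i => ys.map (fun j => (min i j, max i j))))
  -- hits.sort() on int pairs = lexicographic tuple sort
  (PySem.List.sorted2 hits (fun p => p.1) (fun p => p.2)).map
    (fun ij => (PySem.List.pyGetD normalized ij.1 "", PySem.List.pyGetD normalized ij.2 ""))

-- ===== PRECONDITION & SPEC =====
def Spec_detect_clashes (colors : List String) (out : List (String × String)) : Prop := out = detect_clashes_alt colors
instance (colors : List String) (out : List (String × String)) : Decidable (Spec_detect_clashes colors out) := by unfold Spec_detect_clashes; infer_instance

-- ===== CLAIM (what is proved, stated in full; the proofs are below) =====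
def Claim_equal_detect_clashes : Prop := ∀ (colors : List String), Dom_detect_clashes colors → Spec_detect_clashes colors (detect_clashes colors)

-- ===== LEMMAS AND PROOFS =====

lemma pvToNat_ofNat (n : Nat) (h : Nat.isValidChar n) : (Char.ofNat n).toNat = n := by
  unfold Char.ofNat; split; · rfl
  · contradiction

lemma pvChar_le_iff (a b : Char) : a ≤ b ↔ a.toNat ≤ b.toNat := Iff.rfl

lemma lowerChar_idem (c : Char) :
    PySem.Chars.lowerChar (PySem.Chars.lowerChar c) = PySem.Chars.lowerChar c := by
  unfold PySem.Chars.lowerChar PySem.Chars.isupper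
  by_cases h : 'A' ≤ c ∧ c ≤ 'Z'
  · have h1 : (65:Nat) ≤ c.toNat := (pvChar_le_iff 'A' c).1 h.1
    have h2 : c.toNat ≤ 90 := (pvChar_le_iff c 'Z').1 h.2
    have hv : Nat.isValidChar (c.toNat + 32) := Or.inl (by omega)
    have ht : (Char.ofNat (c.toNat + 32)).toNat = c.toNat + 32 := pvToNat_ofNat _ hv
    simp only [h.1, h.2, decide_true, Bool.and_self, if_true]
    rw [if_neg]
    rw [Bool.and_eq_true, decide_eq_true_eq, decide_eq_true_eq]
    rintro ⟨-, hh⟩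
    have := (pvChar_le_iff _ 'Z').1 hh
    rw [ht] at this
    have : c.toNat + 32 ≤ 90 := this
    omega
  · have hb : (decide ('A' ≤ c) && decide (c ≤ 'Z')) = false := by
      simpa [Decidable.not_and_iff_not_or_not] using h
    simp only [hb]
    simp only [Bool.false_eq_true, if_false, hb]

lemma isspace_lowerChar (c : Char) :
    PySem.Chars.isspace (PySem.Chars.lowerChar c) = PySem.Chars.isspace c := by
  unfold PySem.Chars.lowerChar
  by_cases h : ('A' ≤ c ∧ c ≤ 'Z')
  · have h1 : (65:Nat) ≤ c.toNat := (pvChar_le_iff 'A' c).1 h.1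
    have h2 : c.toNat ≤ 90 := (pvChar_le_iff c 'Z').1 h.2
    have hv : Nat.isValidChar (c.toNat + 32) := Or.inl (by omega)
    have ht : (Char.ofNat (c.toNat + 32)).toNat = c.toNat + 32 := pvToNat_ofNat _ hv
    simp only [h.1, h.2, decide_true, Bool.and_self, PySem.Chars.isupper, if_true]
    unfold PySem.Chars.isspace
    simp only [ht]
    have : ∀ b1 b2 : Bool, b1 = false → b2 = false → b1 = b2 := by rintro _ _ rfl rfl; rfl
    apply this <;> (simp only [Bool.or_eq_false_iff, Bool.and_eq_false_iff, decide_eq_false_iff_not]; omega)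
  · have hb : (decide ('A' ≤ c) && decide (c ≤ 'Z')) = false := by
      simpa [Decidable.not_and_iff_not_or_not] using h
    simp [PySem.Chars.isupper, hb]

lemma pvDropWhile_prefix (p : Char → Bool) (l l' : List Char)
    (h : l.dropWhile p = l) (hp : l' <+: l) : l'.dropWhile p = l' := by
  cases l' with
  | nil => rfl
  | cons a t =>
    cases l with
    | nil => simp at hp
    | cons b u =>
      obtain ⟨s, hs⟩ := hp
      injection hs with h1 h2
      subst h1
      rw [List.dropWhile_cons]
      have : p a = false := by
        by_contra hpa
        rw [List.dropWhile_cons, if_pos (by simpa using hpa)] at h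
        have := congrArg List.length h
        simp at this
        have := List.length_dropWhile_le p u
        omega
      simp [this]

lemma pvLower_lower (l : List Char) :
    PySem.Chars.lower (PySem.Chars.lower l) = PySem.Chars.lower l := by
  simp only [PySem.Chars.lower, List.map_map]
  exact List.map_congr_left (fun c _ => lowerChar_idem c)

lemma pvLower_lstrip (l : List Char) :
    PySem.Chars.lower (PySem.Chars.lstrip l) = PySem.Chars.lstrip (PySem.Chars.lower l) := by
  simp only [PySem.Chars.lower, PySem.Chars.lstrip, List.dropWhile_map,
    show (PySem.Chars.isspace ∘ PySem.Chars.lowerChar) = PySem.Chars.isspace from funext isspace_lowerChar]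

lemma pvLower_rstrip (l : List Char) :
    PySem.Chars.lower (PySem.Chars.rstrip l) = PySem.Chars.rstrip (PySem.Chars.lower l) := by
  simp only [PySem.Chars.lower, PySem.Chars.rstrip, ← List.map_reverse, List.dropWhile_map,
    show (PySem.Chars.isspace ∘ PySem.Chars.lowerChar) = PySem.Chars.isspace from funext isspace_lowerChar]

lemma pvRstrip_prefix (l : List Char) : PySem.Chars.rstrip l <+: l := by
  unfold PySem.Chars.rstrip
  have h : l.reverse.dropWhile PySem.Chars.isspace <:+ l.reverse := List.dropWhile_suffix _
  have h2 : (l.reverse.dropWhile PySem.Chars.isspace).reverse <+: l.reverse.reverse := by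
    exact List.reverse_prefix.mpr (by simpa using h)
  simpa using h2

lemma pvRstrip_rstrip (l : List Char) :
    PySem.Chars.rstrip (PySem.Chars.rstrip l) = PySem.Chars.rstrip l := by
  unfold PySem.Chars.rstrip
  simp [List.dropWhile_idempotent]

lemma pvStrip_strip (l : List Char) :
    PySem.Chars.strip (PySem.Chars.strip l) = PySem.Chars.strip l := by
  unfold PySem.Chars.strip
  have hm : (PySem.Chars.lstrip l).dropWhile PySem.Chars.isspace = PySem.Chars.lstrip l := by
    unfold PySem.Chars.lstrip
    exact List.dropWhile_idempotent _ _
  have h1 : PySem.Chars.lstrip (PySem.Chars.rstrip (PySem.Chars.lstrip l)) = PySem.Chars.rstrip (PySem.Chars.lstrip l) := by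
    unfold PySem.Chars.lstrip
    exact pvDropWhile_prefix _ _ _ hm (pvRstrip_prefix _)
  rw [h1, pvRstrip_rstrip]

def pvNorm (s : String) : String := PySem.Str.strip (PySem.Str.lower s)

lemma pvChars_norm_idem (l : List Char) :
    PySem.Chars.strip (PySem.Chars.lower (PySem.Chars.strip (PySem.Chars.lower l))) =
      PySem.Chars.strip (PySem.Chars.lower l) := by
  have h1 : PySem.Chars.lower (PySem.Chars.strip (PySem.Chars.lower l)) =
      PySem.Chars.strip (PySem.Chars.lower l) := by
    unfold PySem.Chars.strip
    rw [pvLower_rstrip, pvLower_lstrip, pvLower_lower]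
  rw [h1, pvStrip_strip]

lemma pvNorm_idem (s : String) : pvNorm (pvNorm s) = pvNorm s := by
  have h : (pvNorm (pvNorm s)).toList = (pvNorm s).toList := by
    simp only [pvNorm, PySem.Str.toList_strip, PySem.Str.toList_lower]
    exact pvChars_norm_idem s.toList
  exact String.toList_inj.mp h

def tblAny (a b : String) : Bool :=
  clashTable.any (fun p => (a == p.1 && b == p.2) || (a == p.2 && b == p.1))

lemma pvFact_entries_ne : clashTable.all (fun p => !(p.1 == p.2)) = true := by decide

lemma pvFact_family : monoFamilies.all
    (fun fam => fam.all (fun a => fam.all (fun b => !(tblAny a b)))) = true := by decide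

lemma pvTblAny_self (a : String) : tblAny a a = false := by
  unfold tblAny
  rw [List.any_eq_false]
  intro p hp
  have hne := List.all_eq_true.mp pvFact_entries_ne p hp
  simp only [Bool.not_eq_eq_eq_not, Bool.not_true, beq_eq_false_iff_ne, ne_eq] at hne
  simp only [Bool.or_eq_true, Bool.and_eq_true, beq_iff_eq]
  rintro (⟨h1, h2⟩ | ⟨h1, h2⟩)
  · exact hne (h1.symm.trans h2)
  · exact hne (h2.symm.trans h1)

lemma is_clash_eq_tbl_core (a b : String) :
    (if a == b then false
     else if monoFamilies.any (fun fam => fam.contains a && fam.contains b) then false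
     else clashPairsA.any (fun p => (a == p.1 && b == p.2) || (a == p.2 && b == p.1))) = tblAny a b := by
  by_cases heq : (a == b) = true
  · simp only [heq, if_true]
    have h : a = b := by simpa using heq
    subst h
    exact (pvTblAny_self a).symm
  · simp only [Bool.not_eq_true] at heq
    simp only [heq, Bool.false_eq_true, if_false]
    by_cases hfam : monoFamilies.any (fun fam => fam.contains a && fam.contains b) = true
    · simp only [hfam, if_true]
      rw [List.any_eq_true] at hfam
      obtain ⟨fam, hfm, hab⟩ := hfam
      rw [Bool.and_eq_true] at hab
      have h1 := List.all_eq_true.mp pvFact_family fam hfm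
      have h2 := List.all_eq_true.mp h1 a (by simpa using hab.1)
      have h3 := List.all_eq_true.mp h2 b (by simpa using hab.2)
      simpa using h3.symm
    · simp only [Bool.not_eq_true] at hfam
      simp only [hfam, Bool.false_eq_true, if_false]
      rfl

lemma is_clash_eq_tbl (u v : String) : is_clash u v = tblAny (pvNorm u) (pvNorm v) :=
  is_clash_eq_tbl_core (pvNorm u) (pvNorm v)

def lexPairs (n : Int) : List (Int × Int) :=
  (PySem.List.pyRange 0 n 1).flatMap (fun i =>
    (PySem.List.pyRange (i + 1) n 1).map (fun j => (i, j)))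

def idxOf (norm : List String) (s : String) : List Int :=
  ((PySem.List.enumerate norm).filter (fun p => p.2 == s)).map (fun p => p.1)

def hitsOf (norm : List String) : List (Int × Int) :=
  clashTable.flatMap (fun xy =>
    (idxOf norm xy.1).flatMap (fun i => (idxOf norm xy.2).map (fun j => (min i j, max i j))))

lemma mem_lexPairs (n : Int) (ij : Int × Int) :
    ij ∈ lexPairs n ↔ 0 ≤ ij.1 ∧ ij.1 < ij.2 ∧ ij.2 < n := by
  obtain ⟨i, j⟩ := ij
  simp only [lexPairs, List.mem_flatMap, List.mem_map, PySem.List.mem_pyRange_one, Prod.mk.injEq]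
  constructor
  · rintro ⟨a, ⟨h0, hn⟩, b, ⟨hb1, hb2⟩, rfl, rfl⟩
    exact ⟨h0, by omega, hb2⟩
  · rintro ⟨h0, hij, hn⟩
    exact ⟨i, ⟨h0, by omega⟩, j, ⟨by omega, hn⟩, rfl, rfl⟩

lemma pairwise_lexPairs (n : Int) :
    (lexPairs n).Pairwise (fun a b => a.1 < b.1 ∨ (a.1 = b.1 ∧ a.2 < b.2)) := by
  unfold lexPairs
  rw [List.pairwise_flatMap]
  constructor
  · intro a _
    rw [List.pairwise_map]
    apply (PySem.List.pairwise_lt_pyRange_one _ _).imp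
    intro x y h
    right; exact ⟨rfl, h⟩
  · apply (PySem.List.pairwise_lt_pyRange_one _ _).imp
    intro a b h x hx y hy
    simp only [List.mem_map] at hx hy
    obtain ⟨_, _, rfl⟩ := hx
    obtain ⟨_, _, rfl⟩ := hy
    left; exact h

lemma mem_idxOf (norm : List String) (s : String) (a : Int) :
    a ∈ idxOf norm s ↔ ∃ k : Nat, ∃ h : k < norm.length, a = (k : Int) ∧ norm[k] = s := by
  simp only [idxOf, List.mem_map, List.mem_filter, PySem.List.mem_enumerate_iff]
  constructor
  · rintro ⟨p, ⟨⟨k, hk, hp⟩, hs⟩, rfl⟩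
    subst hp
    refine ⟨k, hk, by simp, ?_⟩
    simpa using hs
  · rintro ⟨k, hk, rfl, hs⟩
    refine ⟨((k : Int), norm[k]), ⟨⟨k, hk, by simp⟩, by simpa using hs⟩, rfl⟩

lemma pairwise_idxOf (norm : List String) (s : String) :
    (idxOf norm s).Pairwise (· < ·) := by
  unfold idxOf
  rw [List.pairwise_map]
  exact (PySem.List.pairwise_lt_enumerate norm 0).filter _

lemma detect_clashes_eq_filtered (colors : List String) :
    detect_clashes colors =
      ((lexPairs (PySem.List.len (colors.map pvNorm))).filter (fun ij =>
          is_clash (PySem.List.pyGetD (colors.map pvNorm) ij.1 "")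
                   (PySem.List.pyGetD (colors.map pvNorm) ij.2 ""))).map (fun ij =>
        (PySem.List.pyGetD (colors.map pvNorm) ij.1 "",
         PySem.List.pyGetD (colors.map pvNorm) ij.2 "")) := by
  simp only [detect_clashes]
  rw [show (fun c => PySem.Str.strip (PySem.Str.lower c)) = pvNorm from rfl]
  simp only [PySem.List.foldl_append_if]
  rw [PySem.List.foldl_append_eq_flatMap]
  simp only [lexPairs, List.filter_flatMap, List.map_flatMap, List.filter_map, List.map_map,
    List.nil_append, Function.comp_def]

lemma nodup_idxOf (norm : List String) (s : String) : (idxOf norm s).Nodup :=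
  (pairwise_idxOf norm s).imp (fun h => ne_of_lt h)

lemma idxOf_value {norm : List String} {s t : String} {a : Int}
    (hs : a ∈ idxOf norm s) (ht : a ∈ idxOf norm t) : s = t := by
  rw [mem_idxOf] at hs ht
  obtain ⟨k, hk, rfl, hks⟩ := hs
  obtain ⟨k', hk', he, hkt⟩ := ht
  have : k' = k := by exact_mod_cast he.symm
  subst this
  exact hks.symm.trans hkt

lemma disjoint_idxOf {norm : List String} {s t : String} (h : s ≠ t) :
    List.Disjoint (idxOf norm s) (idxOf norm t) := by
  intro a ha hb
  exact h (idxOf_value ha hb)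

lemma pvFact_pairs_ne : ∀ p ∈ clashTable, p.1 ≠ p.2 := by decide

lemma pvFact_pairs_distinct : clashTable.Pairwise
    (fun p q => ¬(p.1 = q.1 ∧ p.2 = q.2) ∧ ¬(p.1 = q.2 ∧ p.2 = q.1)) := by decide

lemma pvMinMax_cases {a b a' b' : Int} (h : (min a b, max a b) = (min a' b', max a' b')) :
    (a = a' ∧ b = b') ∨ (a = b' ∧ b = a') := by
  rw [Prod.mk.injEq] at h
  omega

lemma nodup_hitsOf (norm : List String) : (hitsOf norm).Nodup := by
  unfold hitsOf
  rw [List.nodup_flatMap]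
  constructor
  · intro xy hxy
    have hne := pvFact_pairs_ne xy hxy
    have hdisj := disjoint_idxOf (norm := norm) hne
    rw [List.nodup_flatMap]
    constructor
    · intro a ha
      apply (nodup_idxOf norm xy.2).map_on
      intro b hb b' hb' he
      have hb'a : b' ≠ a := fun h => hdisj ha (h ▸ hb')
      rcases pvMinMax_cases he with ⟨_, h2⟩ | ⟨h1, h2⟩
      · exact h2
      · exact absurd h1.symm hb'a
    · apply (pairwise_idxOf norm xy.1).imp_of_mem
      intro a a' ha ha' hlt ij hm hm'
      simp only [List.mem_map] at hm hm'
      obtain ⟨b, hb, he1⟩ := hm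
      obtain ⟨b', hb', he2⟩ := hm'
      rcases pvMinMax_cases (he1.trans he2.symm) with ⟨h1, _⟩ | ⟨h1, h2⟩
      · omega
      · exact hdisj ha (by rw [h1]; exact hb')
  · apply pvFact_pairs_distinct.imp
    intro xy xy' hdist ij hm hm'
    simp only [List.mem_flatMap, List.mem_map] at hm hm'
    obtain ⟨a, ha, b, hb, he1⟩ := hm
    obtain ⟨a', ha', b', hb', he2⟩ := hm'
    rcases pvMinMax_cases (he1.trans he2.symm) with ⟨h1, h2⟩ | ⟨h1, h2⟩
    · exact hdist.1 ⟨idxOf_value ha (by rw [h1]; exact ha'),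
        idxOf_value hb (by rw [h2]; exact hb')⟩
    · exact hdist.2 ⟨idxOf_value ha (by rw [h1]; exact hb'),
        idxOf_value hb (by rw [h2]; exact ha')⟩

lemma mem_idxOf_iff_getD (norm : List String) (s : String) (i : Int)
    (h0 : 0 ≤ i) (hn : i < PySem.List.len norm) :
    i ∈ idxOf norm s ↔ PySem.List.pyGetD norm i "" = s := by
  rw [PySem.List.pyGetD_eq_getElem _ _ h0 (by simpa using hn), mem_idxOf]
  constructor
  · rintro ⟨k, hk, rfl, hks⟩
    simpa using hks
  · intro h
    refine ⟨i.toNat, by simp [PySem.List.len_eq] at hn; omega, by omega, h⟩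

lemma pvNorm_g (colors : List String) (i : Int) (h0 : 0 ≤ i)
    (hn : i < PySem.List.len (colors.map pvNorm)) :
    pvNorm (PySem.List.pyGetD (colors.map pvNorm) i "") =
      PySem.List.pyGetD (colors.map pvNorm) i "" := by
  rw [PySem.List.pyGetD_eq_getElem _ _ h0 (by simpa using hn)]
  rw [List.getElem_map]
  exact pvNorm_idem _

lemma mem_hits_iff_filtered (colors : List String) (ij : Int × Int) :
    ij ∈ hitsOf (colors.map pvNorm) ↔
      ij ∈ (lexPairs (PySem.List.len (colors.map pvNorm))).filter (fun ij =>
        is_clash (PySem.List.pyGetD (colors.map pvNorm) ij.1 "")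
                 (PySem.List.pyGetD (colors.map pvNorm) ij.2 "")) := by
  set norm := colors.map pvNorm with hnorm
  have hlen : (PySem.List.len norm) = (norm.length : Int) := by simp
  rw [List.mem_filter]
  constructor
  · intro h
    simp only [hitsOf, List.mem_flatMap, List.mem_map] at h
    obtain ⟨xy, hxy, a, ha, b, hb, he⟩ := h
    have hxyne := pvFact_pairs_ne xy hxy
    have hane : a ≠ b := by
      rintro rfl
      exact hxyne (idxOf_value ha hb)
    obtain ⟨k, hk, hak, hks⟩ := (mem_idxOf _ _ _).mp ha
    obtain ⟨l, hl, hbl, hls⟩ := (mem_idxOf _ _ _).mp hb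
    have h0a : 0 ≤ a := by omega
    have h0b : 0 ≤ b := by omega
    have hna : a < PySem.List.len norm := by rw [hlen]; omega
    have hnb : b < PySem.List.len norm := by rw [hlen]; omega
    have hga : PySem.List.pyGetD norm a "" = xy.1 := (mem_idxOf_iff_getD _ _ _ h0a hna).mp ha
    have hgb : PySem.List.pyGetD norm b "" = xy.2 := (mem_idxOf_iff_getD _ _ _ h0b hnb).mp hb
    have hmem : ij ∈ lexPairs (PySem.List.len norm) := by
      rw [mem_lexPairs, ← he]
      refine ⟨by simp; omega, by simp; omega, ?_⟩
      simp only [max_lt_iff]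
      exact ⟨hna, hnb⟩
    refine ⟨hmem, ?_⟩
    have h0i : 0 ≤ ij.1 := ((mem_lexPairs _ _).mp hmem).1
    have hni : ij.1 < PySem.List.len norm := by
      have := (mem_lexPairs _ _).mp hmem; rw [hlen] at *; omega
    have h0j : 0 ≤ ij.2 := by have := (mem_lexPairs _ _).mp hmem; omega
    have hnj : ij.2 < PySem.List.len norm := ((mem_lexPairs _ _).mp hmem).2.2
    rw [is_clash_eq_tbl, pvNorm_g colors _ h0i hni, pvNorm_g colors _ h0j hnj]
    unfold tblAny
    rw [List.any_eq_true]
    refine ⟨xy, hxy, ?_⟩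
    rcases lt_or_gt_of_ne hane with hab | hab
    · have hab2 : ij = (a, b) := by rw [← he]; congr 1 <;> omega
      rw [hab2]
      simp only [Bool.or_eq_true, Bool.and_eq_true, beq_iff_eq]
      exact Or.inl ⟨hga, hgb⟩
    · have hab2 : ij = (b, a) := by rw [← he]; congr 1 <;> omega
      rw [hab2]
      simp only [Bool.or_eq_true, Bool.and_eq_true, beq_iff_eq]
      exact Or.inr ⟨hgb, hga⟩
  · rintro ⟨hmem, hcl⟩
    obtain ⟨h0, hij, hn⟩ := (mem_lexPairs _ _).mp hmem
    have h0j : 0 ≤ ij.2 := by omega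
    have hni : ij.1 < PySem.List.len norm := by rw [hlen] at *; omega
    rw [is_clash_eq_tbl, pvNorm_g colors _ h0 hni, pvNorm_g colors _ h0j hn] at hcl
    unfold tblAny at hcl
    rw [List.any_eq_true] at hcl
    obtain ⟨xy, hxy, hcase⟩ := hcl
    simp only [Bool.or_eq_true, Bool.and_eq_true, beq_iff_eq] at hcase
    simp only [hitsOf, List.mem_flatMap, List.mem_map]
    rcases hcase with ⟨h1, h2⟩ | ⟨h1, h2⟩
    · refine ⟨xy, hxy, ij.1, (mem_idxOf_iff_getD _ _ _ h0 hni).mpr h1,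
        ij.2, (mem_idxOf_iff_getD _ _ _ h0j hn).mpr h2, ?_⟩
      have : (min ij.1 ij.2, max ij.1 ij.2) = (ij.1, ij.2) := by
        congr 1 <;> omega
      rw [this]
    · refine ⟨xy, hxy, ij.2, (mem_idxOf_iff_getD _ _ _ h0j hn).mpr h2,
        ij.1, (mem_idxOf_iff_getD _ _ _ h0 hni).mpr h1, ?_⟩
      have : (min ij.2 ij.1, max ij.2 ij.1) = (ij.1, ij.2) := by
        congr 1 <;> omega
      rw [this]

lemma pairwise_filtered (colors : List String) :
    ((lexPairs (PySem.List.len (colors.map pvNorm))).filter (fun ij =>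
        is_clash (PySem.List.pyGetD (colors.map pvNorm) ij.1 "")
                 (PySem.List.pyGetD (colors.map pvNorm) ij.2 ""))).Pairwise
      (fun a b => toLex a < toLex b) := by
  apply List.Pairwise.imp ?_ ((pairwise_lexPairs _).filter _)
  intro a b h
  rw [Prod.Lex.toLex_lt_toLex]
  exact h

lemma hits_perm (colors : List String) :
    (hitsOf (colors.map pvNorm)).Perm
      ((lexPairs (PySem.List.len (colors.map pvNorm))).filter (fun ij =>
        is_clash (PySem.List.pyGetD (colors.map pvNorm) ij.1 "")
                 (PySem.List.pyGetD (colors.map pvNorm) ij.2 ""))) := by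
  have hnd2 : ((lexPairs (PySem.List.len (colors.map pvNorm))).filter (fun ij =>
        is_clash (PySem.List.pyGetD (colors.map pvNorm) ij.1 "")
                 (PySem.List.pyGetD (colors.map pvNorm) ij.2 ""))).Nodup := by
    apply List.Pairwise.imp ?_ (pairwise_filtered colors)
    intro a b h heq
    exact absurd (heq ▸ h) (lt_irrefl _)
  rw [List.perm_ext_iff_of_nodup (nodup_hitsOf _) hnd2]
  exact fun ij => mem_hits_iff_filtered colors ij

lemma sorted2_eq_sorted_toLex (xs : List (Int × Int)) :
    PySem.List.sorted2 xs (fun p => p.1) (fun p => p.2) =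
      PySem.List.sorted xs (fun p => toLex p) := by
  unfold PySem.List.sorted2 PySem.List.sorted
  simp only [if_neg (by decide : ¬ (false = true))]
  have hbe : (fun (a b : Int × Int) =>
      decide (a.1 < b.1) || (!decide (b.1 < a.1) && decide (a.2 < b.2))) =
      (fun (a b : Int × Int) => decide (toLex a < toLex b)) := by
    funext a b
    have hiff : (toLex a < toLex b) ↔ (a.1 < b.1 ∨ (a.1 = b.1 ∧ a.2 < b.2)) :=
      Prod.Lex.toLex_lt_toLex
    by_cases h1 : a.1 < b.1
    · simp [h1, hiff]
    · by_cases h2 : b.1 < a.1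
      · simp [h1, h2, hiff, show ¬(a.1 = b.1) from by omega]
      · simp [hiff, show a.1 = b.1 from by omega]
  exact congrArg (fun be => List.foldl (fun acc x => PySem.List.insertBy be x acc) [] xs) hbe

lemma sorted2_hits (colors : List String) :
    PySem.List.sorted2 (hitsOf (colors.map pvNorm)) (fun p => p.1) (fun p => p.2) =
      (lexPairs (PySem.List.len (colors.map pvNorm))).filter (fun ij =>
        is_clash (PySem.List.pyGetD (colors.map pvNorm) ij.1 "")
                 (PySem.List.pyGetD (colors.map pvNorm) ij.2 "")) := by
  rw [sorted2_eq_sorted_toLex]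
  exact PySem.List.sorted_eq_of_perm_of_pairwise_lt _ _ _
    (hits_perm colors).symm (pairwise_filtered colors)

-- ===== VERDICT (by name: the statement is the Claim_ definition above) =====
theorem detect_clashes_spec : Claim_equal_detect_clashes := by
  intro colors _
  unfold Spec_detect_clashes
  rw [detect_clashes_eq_filtered]
  show _ = (PySem.List.sorted2 (hitsOf (colors.map pvNorm)) (fun p => p.1) (fun p => p.2)).map
    (fun ij => (PySem.List.pyGetD (colors.map pvNorm) ij.1 "",
                PySem.List.pyGetD (colors.map pvNorm) ij.2 ""))
  rw [sorted2_hits]
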